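-- pv_equiv track=rewrite | github.com/Tandwiro/PL-GerasimovUB-52 | Лаба7.py | sorting_letters
-- ===== SOURCE A (Python) =====
-- def sorting_letters(text):
--     letters = text.split()
--     res_let = []
--     for letter in letters:
--         letters = list(letter)
--         letters.sort()
--         sorted_letter = ' '.join(letters)
--         res_let.append(sorted_letter)
--     result = ''.join(res_let)
--     return result
-- ===== SOURCE B (Python) =====
-- def sorting_letters(text):
--     pieces = []
--     for word in text.split():
--         lo = ord(min(word))
--         hi = ord(max(word))
--         letters = []
--         for code in range(lo, hi + 1):
--             letters.extend(chr(code) * word.count(chr(code)))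
--         pieces.append(' '.join(letters))
--     return ''.join(pieces)
-- ===== Notes on version B (the rewrite author's own statement) =====
-- stated objective: alternative
-- what changed: Per-word comparison sort (list.sort) replaced by a counting pass: scan the code-point range min(word)..max(word) and emit each character count-many times in ascending code order; the outer split/space-join/concatenate structure is kept.
import Mathlib
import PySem

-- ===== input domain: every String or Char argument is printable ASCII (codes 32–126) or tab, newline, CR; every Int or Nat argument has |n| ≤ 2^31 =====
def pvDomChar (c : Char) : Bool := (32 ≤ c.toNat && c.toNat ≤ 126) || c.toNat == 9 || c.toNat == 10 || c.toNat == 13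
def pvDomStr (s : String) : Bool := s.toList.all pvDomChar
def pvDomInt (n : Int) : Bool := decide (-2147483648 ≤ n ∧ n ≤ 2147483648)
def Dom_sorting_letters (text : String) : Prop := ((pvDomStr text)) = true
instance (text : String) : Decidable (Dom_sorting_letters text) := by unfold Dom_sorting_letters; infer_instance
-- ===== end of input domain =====

-- B replaces A's per-word comparison sort by a counting pass over the code-point range
-- min(word)..max(word), emitting each character count-many times in ascending code order
-- (objective: alternative algorithm, same outer split/join structure).

-- ===== PORT A =====
-- literal port of A: split, per word sort the characters and ' '-join them, ''-join the words
def sorting_letters (text : String) : String :=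
  let letters := PySem.Chars.split₀ text.toList
  let res_let := letters.foldl
    (fun acc letter =>
      acc ++ [PySem.Chars.join [' ']
        ((PySem.List.sorted letter (fun c => c) false).map (fun c => [c]))])
    ([] : List (List Char))
  String.mk (PySem.Chars.join [] res_let)

-- ===== PORT B =====
-- literal port of Source B; chr(code) is ported by hand as Char.ofNat code.toNat (exact for
-- 0 ≤ code < 0xD800, which covers every code reached here on the ASCII domain).
-- The `| _, _ => acc` branch only totalizes Python's min/max on the unreachable empty word
-- (split() never yields one; Python's min would raise there).
def sorting_letters_alt (text : String) : String :=
  let pieces := (PySem.Chars.split₀ text.toList).foldl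
    (fun acc word =>
      match PySem.List.min? word (fun c => c), PySem.List.max? word (fun c => c) with
      | some mn, some mx =>
          let lo : Int := (mn.toNat : Int)
          let hi : Int := (mx.toNat : Int)
          let letters := (PySem.List.pyRange lo (hi + 1) 1).foldl
            (fun ls code =>
              ls ++ List.replicate (PySem.List.count word (Char.ofNat code.toNat))
                (Char.ofNat code.toNat))
            ([] : List Char)
          acc ++ [PySem.Chars.join [' '] (letters.map (fun c => [c]))]
      | _, _ => acc)
    ([] : List (List Char))
  String.mk (PySem.Chars.join [] pieces)

-- ===== PRECONDITION & SPEC =====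
def Spec_sorting_letters (text : String) (out : String) : Prop := out = sorting_letters_alt text
instance (text : String) (out : String) : Decidable (Spec_sorting_letters text out) := by unfold Spec_sorting_letters; infer_instance

-- ===== CLAIM (what is proved, stated in full; the proofs are below) =====
def Claim_equal_sorting_letters : Prop := ∀ (text : String), Dom_sorting_letters text → Spec_sorting_letters text (sorting_letters text)

-- ===== LEMMAS AND PROOFS =====

-- every word produced by split() is nonempty and all its characters come from the input
lemma split_go_words (p : Char → Prop) : ∀ (s cur : List Char) (acc : List (List Char)),
    (∀ c ∈ s, p c) → (∀ c ∈ cur, p c) → (∀ w ∈ acc, w ≠ [] ∧ ∀ c ∈ w, p c) →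
    ∀ w ∈ PySem.Chars.split₀.go s cur acc, w ≠ [] ∧ ∀ c ∈ w, p c := by
  intro s
  induction s with
  | nil =>
      intro cur acc hs hcur hacc w hw
      unfold PySem.Chars.split₀.go at hw
      split_ifs at hw with hc
      · exact hacc w (List.mem_reverse.mp hw)
      · rcases List.mem_cons.mp (List.mem_reverse.mp hw) with hw1 | hw1
        · subst hw1
          refine ⟨?_, fun c hcmem => hcur c (List.mem_reverse.mp hcmem)⟩
          simp only [ne_eq, List.reverse_eq_nil_iff]
          simpa using hc
        · exact hacc w hw1
  | cons c rest ih =>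
      intro cur acc hs hcur hacc w hw
      unfold PySem.Chars.split₀.go at hw
      split_ifs at hw with h1 h2
      · exact ih [] acc (fun x hx => hs x (List.mem_cons_of_mem _ hx))
          (by simp) hacc w hw
      · refine ih [] (cur.reverse :: acc) (fun x hx => hs x (List.mem_cons_of_mem _ hx))
          (by simp) ?_ w hw
        intro v hv
        rcases List.mem_cons.mp hv with hv1 | hv1
        · subst hv1
          refine ⟨?_, fun x hx => hcur x (List.mem_reverse.mp hx)⟩
          simp only [ne_eq, List.reverse_eq_nil_iff]
          simpa using h2
        · exact hacc v hv1
      · refine ih (c :: cur) acc (fun x hx => hs x (List.mem_cons_of_mem _ hx)) ?_ hacc w hw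
        intro x hx
        rcases List.mem_cons.mp hx with hx1 | hx1
        · exact hx1 ▸ hs c List.mem_cons_self
        · exact hcur x hx1

lemma split₀_words (p : Char → Prop) (s : List Char) (hs : ∀ c ∈ s, p c) :
    ∀ w ∈ PySem.Chars.split₀ s, w ≠ [] ∧ ∀ c ∈ w, p c :=
  split_go_words p s [] [] hs (by simp) (by simp)

lemma chr_toNat {n : Nat} (h : n ≤ 126) : (Char.ofNat n).toNat = n := by
  have hv : n.isValidChar := Or.inl (by omega)
  simp [Char.ofNat, hv]

lemma chr_ofNat_toNat {a : Char} (h : a.toNat ≤ 126) : Char.ofNat a.toNat = a := by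
  apply Char.ext
  exact UInt32.toNat_inj.mp (chr_toNat h)

lemma char_le_of_toNat_le {a b : Char} (h : a.toNat ≤ b.toNat) : a ≤ b :=
  UInt32.le_iff_toNat_le.mpr h

lemma count_flatMap_char (g : Int → List Char) (l : List Int) (a : Char) :
    (l.flatMap g).count a = (l.map (fun x => (g x).count a)).sum := by
  induction l with
  | nil => simp
  | cons x xs ih => simp [List.count_append, ih]

lemma sum_map_ite_pick {l : List Int} (hnd : l.Nodup) {x : Int} (hx : x ∈ l) (v : Nat) :
    (l.map (fun y => if y = x then v else 0)).sum = v := by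
  induction l with
  | nil => simp at hx
  | cons y ys ih =>
      rcases List.nodup_cons.mp hnd with ⟨hy, hys⟩
      rcases List.mem_cons.mp hx with h | h
      · subst h
        have hz : ∀ z ∈ ys, (if z = x then v else 0) = 0 := by
          intro z hzz
          have hzx : z ≠ x := fun he => hy (he ▸ hzz)
          simp [hzx]
        simp [List.map_congr_left hz]
      · have hne : y ≠ x := fun he => hy (he ▸ h)
        simp [hne, ih hys h]

-- the counting pass over min..max equals Python's comparison sort of the word
lemma scan_eq_sorted (w : List Char) (hA : ∀ c ∈ w, c.toNat ≤ 126)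
    {mn mx : Char} (hmn : PySem.List.min? w (fun c => c) = some mn)
    (hmx : PySem.List.max? w (fun c => c) = some mx) :
    (PySem.List.pyRange (mn.toNat : Int) ((mx.toNat : Int) + 1) 1).foldl
      (fun ls code =>
        ls ++ List.replicate (PySem.List.count w (Char.ofNat code.toNat)) (Char.ofNat code.toNat))
      ([] : List Char)
      = PySem.List.sorted w (fun c => c) false := by
  have hmx126 : mx.toNat ≤ 126 := hA mx (PySem.List.max?_mem hmx)
  have hrange_le : ∀ code ∈ PySem.List.pyRange (mn.toNat : Int) ((mx.toNat : Int) + 1) 1,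
      (mn.toNat : Int) ≤ code ∧ code ≤ (126 : Int) := by
    intro code hc
    have := (PySem.List.mem_pyRange_one).mp hc
    omega
  have hvalid : ∀ code ∈ PySem.List.pyRange (mn.toNat : Int) ((mx.toNat : Int) + 1) 1,
      ((Char.ofNat code.toNat).toNat : Int) = code := by
    intro code hc
    obtain ⟨h1, h2⟩ := hrange_le code hc
    have h0 : (0 : Int) ≤ code := le_trans (by positivity) h1
    have : code.toNat ≤ 126 := by omega
    rw [chr_toNat this]
    omega
  rw [PySem.List.foldl_append_eq_flatMap]
  rw [List.nil_append]
  refine (PySem.List.sorted_id_eq_of_perm_of_pairwise w _ ?_ ?_).symm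
  · -- permutation, by counting every character
    rw [List.perm_iff_count]
    intro a
    rw [count_flatMap_char]
    by_cases ha : a ∈ w
    · have ha126 : a.toNat ≤ 126 := hA a ha
      have hmem : ((a.toNat : Int)) ∈ PySem.List.pyRange (mn.toNat : Int) ((mx.toNat : Int) + 1) 1 := by
        rw [PySem.List.mem_pyRange_one]
        have h1 : mn.toNat ≤ a.toNat := PySem.List.min?_isMin hmn a ha
        have h2 : a.toNat ≤ mx.toNat := PySem.List.max?_isMax hmx a ha
        omega
      have hcongr : ∀ code ∈ PySem.List.pyRange (mn.toNat : Int) ((mx.toNat : Int) + 1) 1,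
          (List.replicate (PySem.List.count w (Char.ofNat code.toNat)) (Char.ofNat code.toNat)).count a
            = if code = (a.toNat : Int) then w.count a else 0 := by
        intro code hc
        rw [List.count_replicate]
        have hv := hvalid code hc
        by_cases he : Char.ofNat code.toNat = a
        · have hcode : code = (a.toNat : Int) := by rw [← he]; omega
          simp [hcode, PySem.List.count]
        · have hcode : code ≠ (a.toNat : Int) := by
            intro hcc
            apply he
            have : code.toNat = a.toNat := by omega
            rw [this, chr_ofNat_toNat ha126]
          simp [he, hcode]
      rw [List.map_congr_left hcongr]
      rw [sum_map_ite_pick (PySem.List.nodup_pyRange_one _ _) hmem]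
    · have hcongr : ∀ code ∈ PySem.List.pyRange (mn.toNat : Int) ((mx.toNat : Int) + 1) 1,
          (List.replicate (PySem.List.count w (Char.ofNat code.toNat)) (Char.ofNat code.toNat)).count a
            = 0 := by
        intro code hc
        rw [List.count_replicate]
        by_cases he : Char.ofNat code.toNat = a
        · simp [he, PySem.List.count, List.count_eq_zero_of_not_mem ha]
        · simp [he]
      rw [List.map_congr_left hcongr]
      simp [List.count_eq_zero_of_not_mem ha]
  · -- sortedness: codes ascend, each block repeats one character
    rw [List.flatMap_def, List.pairwise_flatten]
    constructor
    · intro l' hl'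
      rcases List.mem_map.mp hl' with ⟨code, _, rfl⟩
      exact List.pairwise_replicate.mpr (Or.inr le_rfl)
    · rw [List.pairwise_map]
      refine List.Pairwise.imp_of_mem ?_ (PySem.List.pairwise_lt_pyRange_one _ _)
      intro c1 c2 h1 h2 hlt x hx y hy
      rw [List.eq_of_mem_replicate hx, List.eq_of_mem_replicate hy]
      apply char_le_of_toNat_le
      have hv1 := hvalid c1 h1
      have hv2 := hvalid c2 h2
      omega

-- ===== VERDICT (by name: the statement is the Claim_ definition above) =====
theorem sorting_letters_spec : Claim_equal_sorting_letters := by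
  intro text hdom
  unfold Spec_sorting_letters sorting_letters sorting_letters_alt
  simp only []
  have hchars : ∀ c ∈ text.toList, c.toNat ≤ 126 := by
    intro c hc
    have := List.all_eq_true.mp hdom c hc
    simp only [pvDomChar, Bool.or_eq_true, Bool.and_eq_true, decide_eq_true_eq, beq_iff_eq] at this
    omega
  have hwords := split₀_words (fun c => c.toNat ≤ 126) text.toList hchars
  congr 1
  congr 1
  apply PySem.List.foldl_congr_mem
  intro acc word hword
  obtain ⟨hne, hwc⟩ := hwords word hword
  cases h1 : PySem.List.min? word (fun c => c) with
  | none => exact absurd ((PySem.List.min?_eq_none_iff word _).mp h1) hne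
  | some mn =>
    cases h2 : PySem.List.max? word (fun c => c) with
    | none => exact absurd ((PySem.List.max?_eq_none_iff word _).mp h2) hne
    | some mx =>
      simp only [scan_eq_sorted word hwc h1 h2]
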